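-- pv_equiv track=rewrite | github.com/zhutao100/macos-sandbox-testing-skill | macos-sandbox-testing/scripts/cargo_uninstall.py | _remove_rust_anchor_block
-- ===== SOURCE A (Python) =====
-- _RUST_ANCHOR_BEGIN = "// macos-sandbox-testing: begin"
--
-- _RUST_ANCHOR_END = "// macos-sandbox-testing: end"
--
-- def _remove_rust_anchor_block(txt: str) -> tuple[str, bool]:
--     if _RUST_ANCHOR_BEGIN not in txt or _RUST_ANCHOR_END not in txt:
--         return (txt, False)
--     lines = txt.splitlines(keepends=True)
--     begin_i = end_i = None
--     for i, ln in enumerate(lines):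
--         if ln.rstrip("\n") == _RUST_ANCHOR_BEGIN:
--             begin_i = i
--             continue
--         if begin_i is not None and ln.rstrip("\n") == _RUST_ANCHOR_END:
--             end_i = i
--             break
--     if begin_i is None or end_i is None or end_i < begin_i:
--         return (txt, False)
--
--     del lines[begin_i : end_i + 1]
--     # Trim one extra blank line if we left double-spacing.
--     if begin_i < len(lines) and lines[begin_i].strip() == "":
--         del lines[begin_i]
--     return ("".join(lines), True)
-- ===== SOURCE B (Python) =====
-- _RUST_ANCHOR_BEGIN = "// macos-sandbox-testing: begin"
--
-- _RUST_ANCHOR_END = "// macos-sandbox-testing: end"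
--
-- def _remove_rust_anchor_block(txt: str) -> tuple[str, bool]:
--     # Single forward pass with a rollback point instead of find-indices-then-delete.
--     if _RUST_ANCHOR_BEGIN not in txt or _RUST_ANCHOR_END not in txt:
--         return (txt, False)
--     lines = txt.splitlines(keepends=True)
--     out = []
--     rollback = None
--     for i, ln in enumerate(lines):
--         core = ln.rstrip("\n")
--         if core == _RUST_ANCHOR_BEGIN:
--             rollback = len(out)
--             out.append(ln)
--             continue
--         if rollback is not None and core == _RUST_ANCHOR_END:
--             del out[rollback:]
--             rest = lines[i + 1:]
--             if rest and rest[0].strip() == "":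
--                 rest = rest[1:]
--             return ("".join(out + rest), True)
--         out.append(ln)
--     return (txt, False)
-- ===== Notes on version B (the rewrite author's own statement) =====
-- stated objective: alternative
-- what changed: Replaces the two-phase find-marker-indices-then-slice-delete with a single forward pass that copies lines into an output buffer, records a rollback point at each BEGIN line, and on the first matching END truncates the buffer to the rollback point and emits the remainder (trimming one blank line).
import Mathlib
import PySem

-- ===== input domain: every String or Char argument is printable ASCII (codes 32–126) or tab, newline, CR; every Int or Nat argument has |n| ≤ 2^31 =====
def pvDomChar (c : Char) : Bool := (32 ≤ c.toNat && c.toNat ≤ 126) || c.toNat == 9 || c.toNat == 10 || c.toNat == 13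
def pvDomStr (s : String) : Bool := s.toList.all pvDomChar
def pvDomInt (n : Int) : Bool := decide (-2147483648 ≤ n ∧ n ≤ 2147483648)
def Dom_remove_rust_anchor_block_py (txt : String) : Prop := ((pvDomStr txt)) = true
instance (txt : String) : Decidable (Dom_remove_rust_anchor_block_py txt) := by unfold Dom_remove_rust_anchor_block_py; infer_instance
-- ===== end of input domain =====

-- B replaces A's find-marker-indices-then-slice-delete with a single forward pass
-- keeping an output buffer and a rollback point; same cost, different decomposition.

-- ===== PORT A =====
-- shared builtin ports: txt.splitlines(keepends=True) and ln.rstrip("\n"),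
-- exact on the domain's line-break characters ('\n', '\r', '\r\n')
def pvSK (acc : List Char) : List Char → List (List Char)
  | [] => if acc.isEmpty then [] else [acc.reverse]
  | '\r' :: '\n' :: rest => (acc.reverse ++ ['\r', '\n']) :: pvSK [] rest
  | '\r' :: rest => (acc.reverse ++ ['\r']) :: pvSK [] rest
  | '\n' :: rest => (acc.reverse ++ ['\n']) :: pvSK [] rest
  | c :: rest => pvSK (c :: acc) rest

def pvSplitKeep (cs : List Char) : List (List Char) := pvSK [] cs

def pvRstripNl (cs : List Char) : List Char := (cs.reverse.dropWhile (· = '\n')).reverse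

def pvBeginL : List Char := "// macos-sandbox-testing: begin".toList
def pvEndL : List Char := "// macos-sandbox-testing: end".toList

-- the search loop of A: for i, ln in enumerate(lines): …
def pvFindA (i : Nat) (b : Option Nat) : List (List Char) → Option Nat × Option Nat
  | [] => (b, none)
  | ln :: rest =>
    if pvRstripNl ln = pvBeginL then pvFindA (i + 1) (some i) rest
    else if b.isSome ∧ pvRstripNl ln = pvEndL then (b, some i)
    else pvFindA (i + 1) b rest

-- A's tail: del lines[begin_i:end_i+1]; optional blank-line trim; "".join
def pvAfterA (lines : List (List Char)) (b e : Nat) (_txt : String) : String × Bool :=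
  let l2 := lines.take b ++ lines.drop (e + 1)
  let l3 := if b < l2.length ∧ PySem.Chars.strip (l2.getD b []) = [] then l2.eraseIdx b else l2
  (String.ofList (PySem.Chars.join [] l3), true)

def remove_rust_anchor_block_py (txt : String) : String × Bool :=
  if !(PySem.Str.isIn "// macos-sandbox-testing: begin" txt) ||
     !(PySem.Str.isIn "// macos-sandbox-testing: end" txt) then (txt, false)
  else
    let lines := pvSplitKeep txt.toList
    match pvFindA 0 none lines with
    | (some b, some e) => if e < b then (txt, false) else pvAfterA lines b e txt
    | _ => (txt, false)

-- ===== PORT B =====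
-- single pass: copy lines to `out`, record rollback index at each BEGIN,
-- on first END after a BEGIN truncate and emit the remainder
def pvLoopB (txt : String) (out : List (List Char)) (rb : Option Nat) :
    List (List Char) → String × Bool
  | [] => (txt, false)
  | ln :: rest =>
    let core := pvRstripNl ln
    if core = pvBeginL then pvLoopB txt (out ++ [ln]) (some out.length) rest
    else if rb.isSome ∧ core = pvEndL then
      let out2 := out.take (rb.getD 0)
      let rest2 := match rest with
        | r :: rs => if PySem.Chars.strip r = [] then rs else r :: rs
        | [] => []
      (String.ofList (PySem.Chars.join [] (out2 ++ rest2)), true)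
    else pvLoopB txt (out ++ [ln]) rb rest

def remove_rust_anchor_block_py_alt (txt : String) : String × Bool :=
  if !(PySem.Str.isIn "// macos-sandbox-testing: begin" txt) ||
     !(PySem.Str.isIn "// macos-sandbox-testing: end" txt) then (txt, false)
  else pvLoopB txt [] none (pvSplitKeep txt.toList)

-- ===== PRECONDITION & SPEC =====
def Spec_remove_rust_anchor_block_py (txt : String) (out : String × Bool) : Prop := out = remove_rust_anchor_block_py_alt txt
instance (txt : String) (out : String × Bool) : Decidable (Spec_remove_rust_anchor_block_py txt out) := by unfold Spec_remove_rust_anchor_block_py; infer_instance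

-- ===== CLAIM (what is proved, stated in full; the proofs are below) =====
def Claim_equal_remove_rust_anchor_block_py : Prop := ∀ (txt : String), Dom_remove_rust_anchor_block_py txt → Spec_remove_rust_anchor_block_py txt (remove_rust_anchor_block_py txt)

-- ===== LEMMAS AND PROOFS =====
theorem pv_drop_len_succ {α : Type} (pre : List α) (x : α) (l : List α) :
    (pre ++ x :: l).drop (pre.length + 1) = l := by
  induction pre with
  | nil => simp
  | cons a t ih => simpa using ih

theorem pv_eraseIdx_append_cons {α : Type} (A : List α) (r : α) (B : List α) :
    (A ++ r :: B).eraseIdx A.length = A ++ B := by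
  induction A with
  | nil => simp
  | cons a t ih => simpa [List.eraseIdx] using ih

theorem pv_getD_append_len {α : Type} (A : List α) (r : α) (B : List α) (d : α) :
    (A ++ r :: B).getD A.length d = r := by
  induction A with
  | nil => simp
  | cons a t ih => simpa using ih

-- the loop invariant: B's pass with buffer `pre` and rollback `rb` computes
-- exactly what A computes from `pvFindA pre.length rb rest` on `pre ++ rest`
theorem pv_key (rest : List (List Char)) : ∀ (pre : List (List Char)) (rb : Option Nat)
    (txt : String), (∀ k, rb = some k → k ≤ pre.length) →
    pvLoopB txt pre rb rest =
      (match pvFindA pre.length rb rest with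
       | (some b, some e) => if e < b then (txt, false) else pvAfterA (pre ++ rest) b e txt
       | _ => (txt, false)) := by
  induction rest with
  | nil =>
    intro pre rb txt _
    cases rb <;> simp [pvLoopB, pvFindA]
  | cons ln rest ih =>
    intro pre rb txt hrb
    by_cases hbeg : pvRstripNl ln = pvBeginL
    · have h1 : pvLoopB txt pre rb (ln :: rest) =
          pvLoopB txt (pre ++ [ln]) (some pre.length) rest := by
        simp [pvLoopB, hbeg]
      have h2 : pvFindA pre.length rb (ln :: rest) =
          pvFindA (pre.length + 1) (some pre.length) rest := by
        simp [pvFindA, hbeg]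
      rw [h1, h2, ih (pre ++ [ln]) (some pre.length) txt
            (by intro k hk; cases hk; simp)]
      simp
    · cases rb with
      | none =>
        have h1 : pvLoopB txt pre none (ln :: rest) =
            pvLoopB txt (pre ++ [ln]) none rest := by
          simp [pvLoopB, hbeg]
        have h2 : pvFindA pre.length none (ln :: rest) =
            pvFindA (pre.length + 1) none rest := by
          simp [pvFindA, hbeg]
        rw [h1, h2, ih (pre ++ [ln]) none txt (by intro k hk; cases hk)]
        simp
      | some k =>
        have hk : k ≤ pre.length := hrb k rfl
        by_cases hend : pvRstripNl ln = pvEndL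
        · have hne : ¬ (pvEndL = pvBeginL) := by decide
          have h2 : pvFindA pre.length (some k) (ln :: rest) =
              (some k, some pre.length) := by
            simp [pvFindA, hend, hne]
          rw [h2]
          have hnlt : ¬ pre.length < k := by omega
          show pvLoopB txt pre (some k) (ln :: rest) =
            if pre.length < k then (txt, false) else pvAfterA (pre ++ ln :: rest) k pre.length txt
          rw [if_neg hnlt]
          simp only [pvAfterA]
          have htake : (pre ++ ln :: rest).take k = pre.take k :=
            List.take_append_of_le_length hk
          have hdrop : (pre ++ ln :: rest).drop (pre.length + 1) = rest :=
            pv_drop_len_succ pre ln rest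
          rw [htake, hdrop]
          have hlen : (pre.take k).length = k := by simp [hk]
          cases rest with
          | nil =>
            have hc : ¬ (k < (pre.take k ++ ([] : List (List Char))).length ∧
                PySem.Chars.strip ((pre.take k ++ []).getD k []) = []) := by
              rintro ⟨h1, -⟩; simp [hlen] at h1
            rw [if_neg hc]
            simp [pvLoopB, hend, hne]
          | cons r rs =>
            have hklt : k < (pre.take k ++ r :: rs).length := by
              simp [hlen]
            have hget : (pre.take k ++ r :: rs).getD k [] = r := by
              have := pv_getD_append_len (pre.take k) r rs ([] : List Char)
              rwa [hlen] at this
            have herase : (pre.take k ++ r :: rs).eraseIdx k = pre.take k ++ rs := by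
              have := pv_eraseIdx_append_cons (pre.take k) r rs
              rwa [hlen] at this
            by_cases hstrip : PySem.Chars.strip r = []
            · rw [if_pos ⟨hklt, by rw [hget]; exact hstrip⟩, herase]
              simp [pvLoopB, hend, hne, hstrip]
            · rw [if_neg (by rintro ⟨-, h1⟩; rw [hget] at h1; exact hstrip h1)]
              simp [pvLoopB, hend, hne, hstrip]
        · have h1 : pvLoopB txt pre (some k) (ln :: rest) =
              pvLoopB txt (pre ++ [ln]) (some k) rest := by
            simp [pvLoopB, hbeg, hend]
          have h2 : pvFindA pre.length (some k) (ln :: rest) =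
              pvFindA (pre.length + 1) (some k) rest := by
            simp [pvFindA, hbeg, hend]
          rw [h1, h2, ih (pre ++ [ln]) (some k) txt
                (by intro k' hk'; cases hk'; simp; omega)]
          simp

-- ===== VERDICT (by name: the statement is the Claim_ definition above) =====
theorem remove_rust_anchor_block_py_spec : Claim_equal_remove_rust_anchor_block_py := by
  intro txt _
  unfold Spec_remove_rust_anchor_block_py remove_rust_anchor_block_py remove_rust_anchor_block_py_alt
  split
  · rfl
  · rw [pv_key (pvSplitKeep txt.toList) [] none txt (by intro k hk; cases hk)]
    simp
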